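/- GENERATED by tools/from_farm_form.py from prooffarm-gif/accepted/DGifGetCodeNext.1/Lemmas.lean (a worked proof of the farm's unit `DGifGetCodeNext.1`,
   accepted by the verdict) — do not edit. -/
import Gif.Spec.Units.DGifGetCodeNext_1
import Gif.Spec.AllSegs

/-!
  Lemmas for the unit `DGifGetCodeNext.1` (a BODY segment of a protected function: the checked load of `gif.Private`, a reader
  call into the object `Buf` of the OWN frame, then either the exit `AfterLen` or a checked store into `gif.Error`): the segment is
  walked in TWO STEPS that meet at the call's return address 0x109fab (`ret2`), with a private assertion there.

      cn1_AtRet2       the assertion at `ret2`: `Body` + the registers and facts that are live THERE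
      cn1_seg_call     0x109f8c … the check, the load of `Private`, the call of InternalRead … 0x109fab: `Start` → `cn1_AtRet2`
      cn1_seg_tail     0x109fab … 0x109fc6 (`Done`) or 0x109fe3 (`AfterLen`): `cn1_AtRet2` → `Done ∨ AfterLen`

  The general lemmas are those of Gif/Spec/FrameCarry.lean §5 (`Env.at_call`, `store_stack`, `store_gif`) and
  Gif/Spec/Carry.lean §4 (`BufOK.own`). The template is farm.gif/worked/DGifGetWord.1.
-/

open X86 X86.User Asan ProgX.Base ProgX.Base.Spec Gif.Spec

set_option maxRecDepth 4000
set_option maxHeartbeats 4000000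

namespace Gif.Spec.DGifGetCodeNext_1

/-- **At 109FABH (ret2), `InternalRead(gif, &Buf, 1)` has returned**: `Body`, `r14 = pv` (loaded at 109F95H), `eax = k ≤ 1` the
bytes delivered, and `k = 1` means the reader advanced by exactly 1. -/
structure cn1_AtRet2 (H : Heap) (rest : List Obj) (frames : List (Nat × FrameLayout)) (F : Forest) (R : Rd) (u₀ e : State)
    (ret : Word) (v : State) : Prop where
  body : DGifGetCodeNext.Body Gif.L.DGifGetCodeNext.ret2 H rest frames F R u₀ e ret v
  r14 : (v.reg .r14).toNat = F.pv
  count : (v.reg .rax).toNat ≤ 1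
  adv : (v.reg .rax).toNat = 1 → rem R v.mem + 1 = rem R e.mem

/-- **109F8CH … the call of InternalRead … 109FABH (ret2)** (dgif_lib.c:781 the checked load of `gif.Private`; l.785
`InternalRead(GifFile, &Buf, 1)`). `edx = 1`, `rsi = &Buf = RA − 88` (the frame's object `Buf` at base + 32), `rdi = rbx = gif`. -/
theorem cn1_seg_call (Lay : Layout) (hLay : Lay.hi = 0x1000000) (μ : Microarch) (hμ : UserX.MicroOK μ) (u₀ : State)
    (hcode : HasCodeNat Lay u₀ Gif.L.DGifGetCodeNext.entry Gif.Code.code_DGifGetCodeNext.nat Gif.L.DGifGetCodeNext.size)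
    (H : Heap) (rest : List Obj) (frames : List (Nat × FrameLayout)) (F : Forest) (R : Rd) (e : State) (ret : Word)
    (h_InternalRead : Calls Lay μ ProgX.Base.WayInv (ProgX.Base.conv u₀) Gif.L.InternalRead.entry
      (Gif.Spec.InternalRead.spec H rest (DGifGetCodeNext.framesIn frames e) F R 1))
    (h_asan_load8_noabort : Asan.SmallCheck Lay μ ProgX.Base.WayInv (ProgX.Base.CodeOK u₀) [.rax, .rcx, .rdx] 8
      ProgX.Base.L.__asan_load8_noabort.entry)
    (v : State) (hat : DGifGetCodeNext.Start H rest frames F R u₀ e ret v) :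
    ReachVia Lay μ ProgX.Base.WayInv v (cn1_AtRet2 H rest frames F R u₀ e ret) := by
  -- THE PRELUDE: the entry assertion `Start` = `Body` + `rdi` still gif + the reader where it was
  have hrem_eq := hat.rem_eq
  obtain ⟨hbody, c_rdi, _⟩ := hat
  have he := hbody.entry
  v_entry he
  obtain ⟨henv, hrdi, hout⟩ := hbody.pre
  have hblock := hbody.block_above
  -- what the walker reads of a segment's entry state: rip, rsp (as `c_rsp`), the registers kept, the text, DF / MXCSR
  have w_rip := hbody.rip
  have c_rsp : v.reg .rsp = e.reg .rsp - 136 := hbody.rsp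
  have c_rbx : v.reg .rbx = e.reg .rdi := hbody.rbx
  have w_kept : RegsKept [.rsp] v v := RegsKept.refl _ _
  have w_eq : Mem.EqOn ProgX.Base.L.textLo ProgX.Base.L.textHi u₀.mem v.mem := ProgX.Base.conv_code_eqOn hbody.code
  have hdf := (show abiInv _ from hbody.abi).1
  have hmx := (show abiInv _ from hbody.abi).2
  have hsse := ProgX.Base.sseOK_of_abiInv hbody.abi
  -- the slots and the footprint that `Body` at the exit states again
  have k_r15 : v.mem.readLE (e.reg .rsp - 8) 8 = (e.reg .r15).toNat := hbody.slot_r15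
  have k_r14 : v.mem.readLE (e.reg .rsp - 16) 8 = (e.reg .r14).toNat := hbody.slot_r14
  have k_r13 : v.mem.readLE (e.reg .rsp - 24) 8 = (e.reg .r13).toNat := hbody.slot_r13
  have k_r12 : v.mem.readLE (e.reg .rsp - 32) 8 = (e.reg .r12).toNat := hbody.slot_r12
  have k_rbp : v.mem.readLE (e.reg .rsp - 40) 8 = (e.reg .rbp).toNat := hbody.slot_rbp
  have k_rbx : v.mem.readLE (e.reg .rsp - 48) 8 = (e.reg .rbx).toNat := hbody.slot_rbx
  have k_ra : UInt64.ofNat (v.mem.readLE (e.reg .rsp) 8) = ret := hbody.slot_ra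
  have hsame : Mem.SameExcept
    [⟨(e.reg .rsp).toNat - 320, (e.reg .rsp).toNat⟩,
     shadowSpan ((e.reg .rsp).toNat - 120) ((e.reg .rsp).toNat - 56),
     ⟨F.pv + 56, F.pv + 64⟩,
     ⟨F.pv + 88, F.pv + 344⟩,
     ⟨(e.reg .rsi).toNat, (e.reg .rsi).toNat + 8⟩,
     ⟨F.gif + 96, F.gif + 100⟩,
     ⟨R.cur, R.cur + 8⟩] e.mem v.mem := hbody.same
  -- where the cursor, gif and pv are, as numbers (`v_side`, `u_same`, `u_omega` place every store with them)
  have hcur := henv.ctx.cursor_range henv.heap.inv.shadow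
  have hgin := henv.ok.owns.inside henv.heap.inv.heap (o := (F.gif, 120)) List.mem_cons_self
  have hpin := henv.ok.owns.inside henv.heap.inv.heap (o := (F.pv, 24936)) (List.mem_cons_of_mem _ List.mem_cons_self)
  have hbase := henv.heap.base
  simp only at hgin hpin
  rw [hbase] at hgin hpin
  -- gif is live under the body's frames: what the check goal asks
  have hgl : LiveIn (H.liveObjs ++ rest) (DGifGetCodeNext.framesIn frames e) F.gif 120 :=
    hbody.ok.gif_live.liveIn rest _ (Nat.le_refl _) (Nat.le_refl _)
  -- the load of `gif.Private`, as a fact about the present memory in the walker's form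
  have hpriv := hbody.ok.shape.priv
  simp only [gfield] at hpriv
  have l_priv : v.mem.readLE (e.reg .rdi + 0x70) 8 = F.pv := by
    rw [rd_eq_readLE v.mem (e.reg .rdi + 0x70) (F.gif + 112) 8 (by u_omega)]
    exact hpriv
  -- THE WALK, to the call's return address
  u_walk hcode [hμ.vendor] until [Gif.L.DGifGetCodeNext.ret2] span [ProgX.Base.L.textLo, ProgX.Base.L.textHi] side (v_side)
  case check_109f90 =>
    -- dgif_lib.c:781 the load of `gif.Private`: 8 bytes inside gif
    have hun : ShadowUntouched v.mem s_109f90.mem := by v_untouched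
    exact hgl.accSmall hbody.inv.shadow hun _ 8 (by decide) (by u_omega) (by u_omega)
  case call_inv =>
    v_inv
  case pre_109fa6 =>
    -- INTERNALREAD'S PRECONDITION. The environment for the frame list with the own frame in front: only return addresses were
    -- pushed since `v`
    have hs : Mem.SameExcept [⟨(e.reg .rsp).toNat - 320, (e.reg .rsp).toNat - 136⟩] v.mem s_109fa6.mem := by
      rw [w_mem]
      u_same
    have henv' : Env H rest (DGifGetCodeNext.framesIn frames e) F R s_109fa6 := by
      refine henv.at_call hbody.inv hbody.ok hs (by omega) (by omega) ?_ ?_ ?_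
      · rw [w_rsp]
        u_omega
      · rw [w_rsp]
        u_omega
      · rw [w_rsp]
        u_omega
    -- the buffer is the frame's object `Buf` (`[rsp + 0x30]` = base + 32, 1 byte), named by its numbers
    have ho : (⟨(e.reg .rsp).toNat - 120 + 32, 1, .stack⟩ : Obj) ∈
        Gif.Frames.DGifGetCodeNext.objsAt ((e.reg .rsp).toNat - 120) := List.mem_cons_self
    have hsz : Gif.Frames.DGifGetCodeNext.size = 64 := rfl
    have hb : (e.reg .rsp).toNat - 120 + Gif.Frames.DGifGetCodeNext.size ≤ (e.reg .rsp).toNat + 8 := by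
      rw [hsz]
      omega
    have hbuf : BufOK H rest (DGifGetCodeNext.framesIn frames e) F R (s_109fa6.reg .rsi).toNat 1 := by
      apply BufOK.own henv.heap henv.ctx hbody.inv hb ho
      · rw [w_rsi]
        u_omega
      · rw [w_rsi]
        u_omega
    -- the clauses: `Env`, `rdi = gif`, `edx = 1`, `1 ≤ 1`, `1 < 2 ^ 31`, `BufOK`
    refine ⟨henv', ?_, ?_, by decide, by decide, hbuf⟩
    · rw [w_rdi]
      exact hrdi
    · rw [w_rdx]
      decide
  -- 0x109fab (ret2): INTERNALREAD HAS RETURNED. Its post: `k` bytes delivered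
  obtain ⟨k, hk1, hk2, hk3, hk4, hk5, hback⟩ :
    ReadPost H rest (DGifGetCodeNext.framesIn frames e) F R 1 s_109fa6 s_109fa6r := w_post
  -- the reader at InternalRead's entry is the entry's: only return addresses were pushed
  have hs0 : Mem.SameExcept [⟨(e.reg .rsp).toNat - 320, (e.reg .rsp).toNat - 136⟩] v.mem s_109fa6.mem := by
    rw [w_mem_109fa6]
    u_same
  have hrem0 : rem R s_109fa6.mem = rem R e.mem := by
    rw [← hrem_eq]
    apply rem_sameExcept hs0 (by omega)
    intro w hw
    have e := List.mem_singleton.mp hw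
    rw [e]
    simp only
    omega
  have e_top : (s_109fa6.reg .rsp).toNat + 8 = (e.reg .rsp).toNat - 136 := by
    rw [w_rsp_109fa6]
    u_omega
  -- the callee's footprint in terms of `v` (`w_same : SameExcept […] v.mem s_109fa6r.mem`)
  v_after_call w_rsp_109fa6 w_mem_109fa6
  simp only [w_rsi_109fa6] at w_same
  -- THE SLOTS AND THE RETURN ADDRESS, over the pushed return address (first step) and through InternalRead's footprint
  -- (second step: the buffer `Buf`, the cursor, the stack below)
  have hp15 : s_109fa6.mem.readLE (e.reg .rsp - 8) 8 = (e.reg .r15).toNat := by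
    rw [w_mem_109fa6]
    u_frame k_r15
  rw [w_mem_109fa6] at hp15
  have hs15 : s_109fa6r.mem.readLE (e.reg .rsp - 8) 8 = (e.reg .r15).toNat := by u_frame hp15
  have hp14 : s_109fa6.mem.readLE (e.reg .rsp - 16) 8 = (e.reg .r14).toNat := by
    rw [w_mem_109fa6]
    u_frame k_r14
  rw [w_mem_109fa6] at hp14
  have hs14 : s_109fa6r.mem.readLE (e.reg .rsp - 16) 8 = (e.reg .r14).toNat := by u_frame hp14
  have hp13 : s_109fa6.mem.readLE (e.reg .rsp - 24) 8 = (e.reg .r13).toNat := by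
    rw [w_mem_109fa6]
    u_frame k_r13
  rw [w_mem_109fa6] at hp13
  have hs13 : s_109fa6r.mem.readLE (e.reg .rsp - 24) 8 = (e.reg .r13).toNat := by u_frame hp13
  have hp12 : s_109fa6.mem.readLE (e.reg .rsp - 32) 8 = (e.reg .r12).toNat := by
    rw [w_mem_109fa6]
    u_frame k_r12
  rw [w_mem_109fa6] at hp12
  have hs12 : s_109fa6r.mem.readLE (e.reg .rsp - 32) 8 = (e.reg .r12).toNat := by u_frame hp12
  have hpbp : s_109fa6.mem.readLE (e.reg .rsp - 40) 8 = (e.reg .rbp).toNat := by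
    rw [w_mem_109fa6]
    u_frame k_rbp
  rw [w_mem_109fa6] at hpbp
  have hsbp : s_109fa6r.mem.readLE (e.reg .rsp - 40) 8 = (e.reg .rbp).toNat := by u_frame hpbp
  have hpbx : s_109fa6.mem.readLE (e.reg .rsp - 48) 8 = (e.reg .rbx).toNat := by
    rw [w_mem_109fa6]
    u_frame k_rbx
  rw [w_mem_109fa6] at hpbx
  have hsbx : s_109fa6r.mem.readLE (e.reg .rsp - 48) 8 = (e.reg .rbx).toNat := by u_frame hpbx
  have hpra : UInt64.ofNat (s_109fa6.mem.readLE (e.reg .rsp) 8) = ret := by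
    rw [w_mem_109fa6]
    u_frame k_ra
  rw [w_mem_109fa6] at hpra
  have hsra : UInt64.ofNat (s_109fa6r.mem.readLE (e.reg .rsp) 8) = ret := by u_frame hpra
  -- the footprint since the entry: InternalRead's windows lie inside the function's
  have hsame1 : Mem.SameExcept
    [⟨(e.reg .rsp).toNat - 320, (e.reg .rsp).toNat⟩,
     shadowSpan ((e.reg .rsp).toNat - 120) ((e.reg .rsp).toNat - 56),
     ⟨F.pv + 56, F.pv + 64⟩,
     ⟨F.pv + 88, F.pv + 344⟩,
     ⟨(e.reg .rsi).toNat, (e.reg .rsi).toNat + 8⟩,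
     ⟨F.gif + 96, F.gif + 100⟩,
     ⟨R.cur, R.cur + 8⟩] e.mem s_109fa6r.mem := by u_same
  -- the heap's invariant comes back with the clean stack at the callee's `rsp + 8` = the body's `rsp`
  have hinv1 : HeapInv H rest (DGifGetCodeNext.framesIn frames e) ((e.reg .rsp).toNat - 136) s_109fa6r.mem := by
    rw [← e_top]
    exact hback.inv
  -- THE EXIT ASSERTION: `Body` at `ret2` …
  have hbody1 : DGifGetCodeNext.Body Gif.L.DGifGetCodeNext.ret2 H rest frames F R u₀ e ret s_109fa6r := {
    entry := hbody.entry
    pre := hbody.pre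
    block_above := hblock
    rip := w_rip
    rsp := w_rsp
    rbx := (w_kept.get .rbx rfl).trans hbody.rbx
    r13 := (w_kept.get .r13 rfl).trans hbody.r13
    rbp := (w_kept.get .rbp rfl).trans hbody.rbp
    slot_r15 := hs15
    slot_r14 := hs14
    slot_r13 := hs13
    slot_r12 := hs12
    slot_rbp := hsbp
    slot_rbx := hsbx
    slot_ra := hsra
    inv := hinv1
    ok := hback.ok
    rem := by
      rw [← hrem0]
      exact hback.rem
    same := hsame1
    code := w_code
    abi := w_inv
  }
  -- … and what is live at `ret2`: pv in `r14`, the count in `eax`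
  refine ReachVia.done ?_
  exact {
    body := hbody1
    r14 := by
      rw [w_r14]
      u_omega
    count := by
      rw [hk4]
      exact hk1
    adv := by
      intro h1
      rw [hk4] at h1
      rw [hk5, hrem0]
      rw [hrem0] at hk2
      omega
  }

/-- **109FABH (ret2) … 109FC6H or 109FE3H** (dgif_lib.c:785-788): `cmp eax, 1`; one byte: the `je` to 109FE3H (`AfterLen`); no
byte: the checked store of `gif.Error = 102`, `r12d = 0` (`Done`). -/
theorem cn1_seg_tail (Lay : Layout) (hLay : Lay.hi = 0x1000000) (μ : Microarch) (hμ : UserX.MicroOK μ) (u₀ : State)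
    (hcode : HasCodeNat Lay u₀ Gif.L.DGifGetCodeNext.entry Gif.Code.code_DGifGetCodeNext.nat Gif.L.DGifGetCodeNext.size)
    (H : Heap) (rest : List Obj) (frames : List (Nat × FrameLayout)) (F : Forest) (R : Rd) (e : State) (ret : Word)
    (h_asan_store4_noabort : Asan.SmallCheck Lay μ ProgX.Base.WayInv (ProgX.Base.CodeOK u₀) [.rax, .rcx, .rdx] 4
      ProgX.Base.L.__asan_store4_noabort.entry)
    (v : State) (hat : cn1_AtRet2 H rest frames F R u₀ e ret v) :
    ReachVia Lay μ ProgX.Base.WayInv v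
      (fun w => DGifGetCodeNext.Done H rest frames F R u₀ e ret w ∨ DGifGetCodeNext.AfterLen H rest frames F R u₀ e ret w) := by
  -- THE PRELUDE: the entry assertion, as in `cn1_seg_call`
  obtain ⟨hbody, hr14, hcount, hadv⟩ := hat
  have he := hbody.entry
  v_entry he
  obtain ⟨henv, hrdi, hout⟩ := hbody.pre
  have hblock := hbody.block_above
  have w_rip := hbody.rip
  have c_rsp : v.reg .rsp = e.reg .rsp - 136 := hbody.rsp
  have c_rbx : v.reg .rbx = e.reg .rdi := hbody.rbx
  -- `eax` as a variable `z` (the branch fact of `cmp eax, 1` speaks of it)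
  obtain ⟨z, c_rax⟩ : ∃ z, v.reg .rax = z := ⟨_, rfl⟩
  rw [c_rax] at hcount hadv
  have w_kept : RegsKept [.rsp] v v := RegsKept.refl _ _
  have w_eq : Mem.EqOn ProgX.Base.L.textLo ProgX.Base.L.textHi u₀.mem v.mem := ProgX.Base.conv_code_eqOn hbody.code
  have hdf := (show abiInv _ from hbody.abi).1
  have hmx := (show abiInv _ from hbody.abi).2
  have hsse := ProgX.Base.sseOK_of_abiInv hbody.abi
  have k_r15 : v.mem.readLE (e.reg .rsp - 8) 8 = (e.reg .r15).toNat := hbody.slot_r15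
  have k_r14 : v.mem.readLE (e.reg .rsp - 16) 8 = (e.reg .r14).toNat := hbody.slot_r14
  have k_r13 : v.mem.readLE (e.reg .rsp - 24) 8 = (e.reg .r13).toNat := hbody.slot_r13
  have k_r12 : v.mem.readLE (e.reg .rsp - 32) 8 = (e.reg .r12).toNat := hbody.slot_r12
  have k_rbp : v.mem.readLE (e.reg .rsp - 40) 8 = (e.reg .rbp).toNat := hbody.slot_rbp
  have k_rbx : v.mem.readLE (e.reg .rsp - 48) 8 = (e.reg .rbx).toNat := hbody.slot_rbx
  have k_ra : UInt64.ofNat (v.mem.readLE (e.reg .rsp) 8) = ret := hbody.slot_ra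
  have hsame : Mem.SameExcept
    [⟨(e.reg .rsp).toNat - 320, (e.reg .rsp).toNat⟩,
     shadowSpan ((e.reg .rsp).toNat - 120) ((e.reg .rsp).toNat - 56),
     ⟨F.pv + 56, F.pv + 64⟩,
     ⟨F.pv + 88, F.pv + 344⟩,
     ⟨(e.reg .rsi).toNat, (e.reg .rsi).toNat + 8⟩,
     ⟨F.gif + 96, F.gif + 100⟩,
     ⟨R.cur, R.cur + 8⟩] e.mem v.mem := hbody.same
  have hcur := henv.ctx.cursor_range henv.heap.inv.shadow
  have hgin := henv.ok.owns.inside henv.heap.inv.heap (o := (F.gif, 120)) List.mem_cons_self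
  have hbase := henv.heap.base
  simp only at hgin
  rw [hbase] at hgin
  -- gif is live under the body's frames: what the check goal asks
  have hgl : LiveIn (H.liveObjs ++ rest) (DGifGetCodeNext.framesIn frames e) F.gif 120 :=
    hbody.ok.gif_live.liveIn rest _ (Nat.le_refl _) (Nat.le_refl _)
  -- THE WALK, both arms, to the epilogue's first instruction / to segment 2
  u_walk hcode [hμ.vendor] until [Gif.L.DGifGetCodeNext.at_109fc6, Gif.L.DGifGetCodeNext.at_109fe3]
    span [ProgX.Base.L.textLo, ProgX.Base.L.textHi] side (v_side)
  case check_109fb4 =>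
    -- dgif_lib.c:786 the store of `gif.Error`: 4 bytes inside gif
    have hun : ShadowUntouched v.mem s_109fb4.mem := by v_untouched
    exact hgl.accSmall hbody.inv.shadow hun _ 4 (by decide) (by u_omega) (by u_omega)
  · -- 0x109fe3 FROM 0x109fae: one byte was read (`eax = 1`): nothing was stored, `Body` moves as it is
    -- the branch fact of `cmp eax, 1 ; je`: `eax = 1`
    have hz : z.toNat = 1 := by
      rw [toNat_part32] at hbr_109fae
      have e1 : (1 : Nat) % 2 ^ Width.w32.bits = 1 := by decide
      rw [e1] at hbr_109fae
      omega
    clear hbr_109fae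
    -- THE EXIT ASSERTION: `Body` at 0x109fe3 …
    have hbody1 : DGifGetCodeNext.Body Gif.L.DGifGetCodeNext.at_109fe3 H rest frames F R u₀ e ret s_109fae := {
      entry := hbody.entry
      pre := hbody.pre
      block_above := hblock
      rip := w_rip
      rsp := w_rsp
      rbx := (w_kept.get .rbx rfl).trans hbody.rbx
      r13 := (w_kept.get .r13 rfl).trans hbody.r13
      rbp := (w_kept.get .rbp rfl).trans hbody.rbp
      slot_r15 := by
        rw [w_mem]
        exact k_r15
      slot_r14 := by
        rw [w_mem]
        exact k_r14
      slot_r13 := by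
        rw [w_mem]
        exact k_r13
      slot_r12 := by
        rw [w_mem]
        exact k_r12
      slot_rbp := by
        rw [w_mem]
        exact k_rbp
      slot_rbx := by
        rw [w_mem]
        exact k_rbx
      slot_ra := by
        rw [w_mem]
        exact k_ra
      inv := by
        rw [w_mem]
        exact hbody.inv
      ok := by
        rw [w_mem]
        exact hbody.ok
      rem := by
        rw [w_mem]
        exact hbody.rem
      same := by
        rw [w_mem]
        exact hsame
      code := ProgX.Base.conv_code_in w_eq
      abi := by
        refine ProgX.Base.abiInv_of ?_ ?_
        · rw [w_flags]
          simp only [X86.User.df_setStatus]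
          exact hdf
        · rw [w_mxcsr]
          exact hmx
    }
    -- … and what segment 2 starts from: `rax = 1`, `r14 = pv`, exactly one byte consumed
    refine ReachVia.done (Or.inr ?_)
    exact {
      body := hbody1
      rax := by
        rw [w_kept.get .rax rfl, c_rax]
        exact hz
      r14 := by
        rw [w_kept.get .r14 rfl]
        exact hr14
      rem_eq := by
        rw [w_mem]
        exact hadv hz
    }
  · -- 0x109fc6 FROM 0x109fc0: no byte, `gif.Error = D_GIF_ERR_READ_FAILED` stored, r12d = 0
    clear hbr_109fae
    -- the two stores since `v`: the check call's return address (stack), then `gif.Error`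
    obtain ⟨hinvA, hokA, hremA⟩ := store_stack hbody.inv hbody.ok ⟨hcur.1, hcur.2.1⟩ (e.reg .rsp - 144) 8 1089465
      (by u_omega) (by u_omega)
    obtain ⟨hinvB, hokB, hremB⟩ := store_gif hinvA hokA ⟨hcur.1, hcur.2.1⟩ hbase (e.reg .rdi + 96) 4 102
      (Or.inr (Or.inr (by u_omega)))
    rw [← w_mem] at hinvB hokB hremB
    have hremF : rem R s_109fc0.mem = rem R v.mem := hremB.trans hremA
    -- THE EXIT ASSERTION: `Body` at 0x109fc6 …
    have hbody1 : DGifGetCodeNext.Body Gif.L.DGifGetCodeNext.at_109fc6 H rest frames F R u₀ e ret s_109fc0 := {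
      entry := hbody.entry
      pre := hbody.pre
      block_above := hblock
      rip := w_rip
      rsp := w_rsp
      rbx := (w_kept.get .rbx rfl).trans hbody.rbx
      r13 := (w_kept.get .r13 rfl).trans hbody.r13
      rbp := (w_kept.get .rbp rfl).trans hbody.rbp
      slot_r15 := by
        rw [w_mem]
        u_frame k_r15
      slot_r14 := by
        rw [w_mem]
        u_frame k_r14
      slot_r13 := by
        rw [w_mem]
        u_frame k_r13
      slot_r12 := by
        rw [w_mem]
        u_frame k_r12
      slot_rbp := by
        rw [w_mem]
        u_frame k_rbp
      slot_rbx := by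
        rw [w_mem]
        u_frame k_rbx
      slot_ra := by
        rw [w_mem]
        u_frame k_ra
      inv := hinvB
      ok := hokB
      rem := by
        rw [hremF]
        exact hbody.rem
      same := by
        rw [w_mem]
        u_same
      code := ProgX.Base.conv_code_in w_eq
      abi := by
        refine ProgX.Base.abiInv_of ?_ ?_
        · rw [w_flags]
          exact w_df_109fb4
        · rw [w_mxcsr]
          exact hmx
    }
    -- … and the results: GIF_ERROR in `r12`
    refine ReachVia.done (Or.inl ?_)
    exact {
      body := hbody1
      res := by
        right
        rw [w_r12]
        decide
      ok1 := by
        intro h1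
        rw [w_r12] at h1
        exact absurd h1 (by decide)
    }

end Gif.Spec.DGifGetCodeNext_1
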